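-- pv_equiv track=rewrite | github.com/mustakimur/COIN-Attacks | src/semantics/pyedl/edlParse.py | parse_func_signature
-- ===== SOURCE A (Python) =====
-- def parse_func_signature(cline):
--     func = ''
--     rets = ''
--     for c in cline:
--         if (c == ' '):
--             func = ''
--         elif (c == '('):
--             break
--         else:
--             func += c
--         rets += c
--
--     rets = ((rets.replace("public", "")).replace(func, "")).replace(
--         "[cdecl]", "").strip()
--
--     return func, rets
-- ===== SOURCE B (Python) =====
-- def parse_func_signature(cline):
--     prefix = cline.partition('(')[0]
--     func = prefix.rpartition(' ')[2]
--     rets = prefix.replace("public", "").replace(func, "").replace("[cdecl]", "").strip()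
--     return func, rets
-- ===== Notes on version B (the rewrite author's own statement) =====
-- stated objective: simpler
-- what changed: Replaces the char-by-char accumulator loop (reset func on space, break on the opening parenthesis) with direct string decomposition: partition at the first opening parenthesis and rpartition at the last space, then the same replacement chain.
import Mathlib
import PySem

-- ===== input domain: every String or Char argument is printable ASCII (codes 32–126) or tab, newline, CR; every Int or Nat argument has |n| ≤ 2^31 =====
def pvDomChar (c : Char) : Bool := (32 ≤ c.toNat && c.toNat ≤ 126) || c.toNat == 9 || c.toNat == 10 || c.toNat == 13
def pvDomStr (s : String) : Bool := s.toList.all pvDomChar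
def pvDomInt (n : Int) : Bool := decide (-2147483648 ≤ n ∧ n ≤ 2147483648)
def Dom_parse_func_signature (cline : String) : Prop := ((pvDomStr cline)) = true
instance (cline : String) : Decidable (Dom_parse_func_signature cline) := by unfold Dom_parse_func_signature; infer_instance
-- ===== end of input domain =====

-- B replaces A's char-by-char accumulator loop by direct decomposition: take the text before
-- the first '(' and the suffix after its last space, then apply the same replacement chain (objective: simpler).

-- ===== PORT A =====
-- the for-loop of A: state (func, rets); reset func on ' ', break on '(' (before appending), else append to both
def pvLoopA : List Char → List Char → List Char → List Char × List Char
  | [], func, rets => (func, rets)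
  | c :: cs, func, rets =>
    if c = ' ' then pvLoopA cs [] (rets ++ [c])
    else if c = '(' then (func, rets)
    else pvLoopA cs (func ++ [c]) (rets ++ [c])

def parse_func_signature (cline : String) : String × String :=
  let fr := pvLoopA cline.toList [] []
  let func := String.mk fr.1
  let rets := PySem.Str.strip (PySem.Str.replace (PySem.Str.replace
      (PySem.Str.replace (String.mk fr.2) "public" "") func "") "[cdecl]" "")
  (func, rets)

-- ===== PORT B =====
def parse_func_signature_alt (cline : String) : String × String :=
  -- cline.partition('(')[0]
  let pre := cline.toList.takeWhile (· ≠ '(')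
  -- prefix.rpartition(' ')[2]
  let func := (pre.reverse.takeWhile (· ≠ ' ')).reverse
  let rets := PySem.Str.strip (PySem.Str.replace (PySem.Str.replace
      (PySem.Str.replace (String.mk pre) "public" "") (String.mk func) "") "[cdecl]" "")
  (String.mk func, rets)

-- ===== PRECONDITION & SPEC =====
def Spec_parse_func_signature (cline : String) (out : String × String) : Prop := out = parse_func_signature_alt cline
instance (cline : String) (out : String × String) : Decidable (Spec_parse_func_signature cline out) := by unfold Spec_parse_func_signature; infer_instance

-- ===== CLAIM (what is proved, stated in full; the proofs are below) =====
def Claim_equal_parse_func_signature : Prop := ∀ (cline : String), Dom_parse_func_signature cline → Spec_parse_func_signature cline (parse_func_signature cline)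

-- ===== LEMMAS AND PROOFS =====

lemma pv_takeWhile_append_cons {α} (p : α → Bool) (x : List α) (a : α) (y : List α)
    (ha : p a = false) : (x ++ a :: y).takeWhile p = x.takeWhile p := by
  induction x with
  | nil => simp [List.takeWhile, ha]
  | cons b bs ih =>
      simp only [List.cons_append, List.takeWhile]
      cases p b <;> simp [ih]

lemma pv_nospace_takeWhile (func : List Char) (h : ∀ a ∈ func, (a ≠ ' ' : Bool) = true) :
    ((func.reverse.takeWhile (· ≠ ' ')).reverse) = func := by
  rw [List.takeWhile_eq_self_iff.2 (by intro a ha; exact h a (by simpa using ha)),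
    List.reverse_reverse]

lemma pvLoopA_eq (cs func rets : List Char) (h : ∀ a ∈ func, (a ≠ ' ' : Bool) = true) :
    pvLoopA cs func rets =
      (((func ++ cs.takeWhile (· ≠ '(')).reverse.takeWhile (· ≠ ' ')).reverse,
       rets ++ cs.takeWhile (· ≠ '(')) := by
  induction cs generalizing func rets with
  | nil =>
      simp only [pvLoopA, List.takeWhile_nil, List.append_nil]
      rw [pv_nospace_takeWhile func h]
  | cons c cs ih =>
      by_cases hc : c = ' '
      · subst hc
        rw [pvLoopA, if_pos rfl, ih [] (rets ++ [' ']) (by simp)]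
        have ht : (' ' :: cs).takeWhile (· ≠ '(') = ' ' :: cs.takeWhile (· ≠ '(') := by
          simp [List.takeWhile]
        rw [ht]
        refine Prod.ext ?_ (by simp)
        have := pv_takeWhile_append_cons (fun a => (a ≠ ' ' : Bool))
          (cs.takeWhile (· ≠ '(')).reverse ' ' func.reverse (by simp)
        simp only [List.nil_append, List.reverse_append, List.reverse_cons]
        simp at this ⊢
        exact this.symm
      · by_cases hp : c = '('
        · subst hp
          rw [pvLoopA, if_neg (by simpa using hc), if_pos rfl]
          have ht : ('(' :: cs).takeWhile (· ≠ '(') = [] := by simp [List.takeWhile]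
          rw [ht]
          rw [List.append_nil, List.append_nil, pv_nospace_takeWhile func h]
        · rw [pvLoopA, if_neg (by simpa using hc), if_neg (by simpa using hp),
            ih (func ++ [c]) (rets ++ [c]) ?_]
          · have ht : (c :: cs).takeWhile (· ≠ '(') = c :: cs.takeWhile (· ≠ '(') := by
              simp [List.takeWhile, hp]
            rw [ht]
            simp
          · intro a ha
            rcases List.mem_append.1 ha with h1 | h1
            · exact h a h1
            · simp at h1; simp [h1, hc]

-- ===== VERDICT (by name: the statement is the Claim_ definition above) =====
theorem parse_func_signature_spec : Claim_equal_parse_func_signature := by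
  intro cline _
  unfold Spec_parse_func_signature parse_func_signature parse_func_signature_alt
  rw [pvLoopA_eq cline.toList [] [] (by simp)]
  simp
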